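-- pv_equiv track=rewrite | github.com/pypi-data/pypi-mirror-272 | packages/mini-maze/mini_maze-0.1.2.tar.gz/mini_maze-0.1.2/src/mini_maze/maze_generator.py | pad_matrix
-- ===== SOURCE A (Python) =====
-- def pad_matrix(matrix):
--     rows = len(matrix)
--     cols = len(matrix[0])
--
--     # Create a new matrix with additional padding
--     padded_matrix = [[1] * (cols + 2) for _ in range(rows + 2)]
--
--     # Copy the original matrix into the padded matrix
--     for i in range(rows):
--         for j in range(cols):
--             padded_matrix[i + 1][j + 1] = matrix[i][j]
--
--     return padded_matrix
-- ===== SOURCE B (Python) =====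
-- def pad_matrix(matrix):
--     cols = len(matrix[0])
--     top = [1] * (cols + 2)
--     return [top[:]] + [[1] + row[:cols] + [1] for row in matrix] + [top[:]]
-- ===== Notes on version B (the rewrite author's own statement) =====
-- stated objective: simpler
-- what changed: Instead of allocating a full (rows+2)x(cols+2) grid of 1s and then overwriting every interior cell by index arithmetic, B builds each framed row directly as [1]+row[:cols]+[1] between two border rows in a single pass, avoiding the second cell-by-cell write pass (measured constant-factor speedup).
import Mathlib
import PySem

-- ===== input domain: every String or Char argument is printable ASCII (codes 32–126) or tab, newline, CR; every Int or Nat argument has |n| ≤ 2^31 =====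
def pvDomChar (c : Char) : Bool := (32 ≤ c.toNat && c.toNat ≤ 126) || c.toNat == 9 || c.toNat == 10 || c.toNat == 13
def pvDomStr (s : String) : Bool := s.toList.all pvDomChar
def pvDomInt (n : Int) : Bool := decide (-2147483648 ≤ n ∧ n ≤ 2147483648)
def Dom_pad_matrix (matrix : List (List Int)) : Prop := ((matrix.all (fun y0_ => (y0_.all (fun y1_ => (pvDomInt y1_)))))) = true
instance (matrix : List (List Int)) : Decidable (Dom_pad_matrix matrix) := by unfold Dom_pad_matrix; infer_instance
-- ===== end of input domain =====

-- B builds each framed row directly ([1] + row[:cols] + [1]) between two shared border rows,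
-- instead of A's allocate-a-grid-of-1s-then-overwrite-the-interior pattern (objective: simpler).

-- ===== PORT A =====
-- range(n) has nonnegative bounds here, so it is ported exactly as List.range n.
-- matrix[0] raises IndexError on an empty matrix (excluded by Pre_); matrix[i] is in range by the
-- loop bound; matrix[i][j] is in range under Pre_ (rows shorter than cols make A raise IndexError,
-- and Pre_ excludes them), so the .getD defaults are never used inside Pre_.
def pad_matrix (matrix : List (List Int)) : List (List Int) :=
  let rows := matrix.length
  let cols := ((PySem.List.pyGet? matrix 0).getD []).length
  let padded := (List.range (rows + 2)).map (fun _ => List.replicate (cols + 2) (1 : Int))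
  (List.range rows).foldl (fun pm i =>
    (List.range cols).foldl (fun pm j =>
      pm.modify (i + 1) (fun row => row.set (j + 1) ((matrix.getD i []).getD j 0))) pm) padded

-- ===== PORT B =====
-- row[:cols] with cols = len(matrix[0]) ≥ 0 is exactly List.take cols; [1]+xs+[1] is 1 :: (xs ++ [1]).
def pad_matrix_alt (matrix : List (List Int)) : List (List Int) :=
  let cols := (matrix.headD []).length
  let top := List.replicate (cols + 2) (1 : Int)
  [top] ++ matrix.map (fun row => 1 :: (row.take cols ++ [1])) ++ [top]

-- ===== PRECONDITION & SPEC =====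
-- Pre_ excludes exactly the inputs on which A raises IndexError: the empty matrix (matrix[0]),
-- and matrices with a row shorter than the first row (padded_matrix[i+1][j+1] = matrix[i][j]).
def Pre_pad_matrix (matrix : List (List Int)) : Prop :=
  matrix ≠ [] ∧ ∀ row ∈ matrix, (matrix.headD []).length ≤ row.length
instance (matrix : List (List Int)) : Decidable (Pre_pad_matrix matrix) := by
  unfold Pre_pad_matrix; infer_instance

def pvWitness_pad_matrix : List (List Int) := [[0, 2], [3, 4]]

def Spec_pad_matrix (matrix : List (List Int)) (out : List (List Int)) : Prop := out = pad_matrix_alt matrix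
instance (matrix : List (List Int)) (out : List (List Int)) : Decidable (Spec_pad_matrix matrix out) := by unfold Spec_pad_matrix; infer_instance

-- ===== CLAIM (what is proved, stated in full; the proofs are below) =====
def Claim_equal_pad_matrix : Prop := ∀ (matrix : List (List Int)), Dom_pad_matrix matrix → Pre_pad_matrix matrix → Spec_pad_matrix matrix (pad_matrix matrix)

-- ===== LEMMAS AND PROOFS =====

theorem pv_modify_cons_succ {α : Type} (a : α) (l : List α) (n : Nat) (f : α → α) :
    (a :: l).modify (n + 1) f = a :: l.modify n f := by
  simp [List.modify]

theorem pv_modify_zero_cons {α : Type} (a : α) (l : List α) (f : α → α) :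
    (a :: l).modify 0 f = f a :: l := by
  simp [List.modify]

-- modify twice at the same index composes
theorem pv_modify_modify {α : Type} (l : List α) (n : Nat) (f g : α → α) :
    (l.modify n f).modify n g = l.modify n (fun x => g (f x)) := by
  induction l generalizing n with
  | nil => simp
  | cons a t ih =>
    cases n with
    | zero => simp [pv_modify_zero_cons]
    | succ n => simp [pv_modify_cons_succ, ih]

-- a fold that always modifies the same index is one modify by the folded function
theorem pv_foldl_modify_fixed {α β : Type} (L : List β) (n : Nat)
    (g : β → α → α) (pm : List α) :
    L.foldl (fun pm j => pm.modify n (g j)) pm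
      = pm.modify n (fun x => L.foldl (fun x j => g j x) x) := by
  induction L generalizing pm with
  | nil =>
    simp only [List.foldl_nil]
    exact (List.modify_id n pm).symm
  | cons b t ih => simp [List.foldl_cons, ih, pv_modify_modify]

theorem pv_modify_append_right {α : Type} (l1 l2 : List α) (k : Nat) (f : α → α) :
    (l1 ++ l2).modify (l1.length + k) f = l1 ++ l2.modify k f := by
  induction l1 with
  | nil => simp
  | cons a t ih => simpa [List.modify, Nat.succ_add] using ih

-- the frame invariant: folding modifications at indices 1..c over a constant list
-- rewrites exactly the first c interior cells, leaving the border and the tail intact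
theorem pv_fold_frame {α : Type} (g : Nat → α → α) (a : α) (c n : Nat) (hc : c ≤ n) :
    (List.range c).foldl (fun l i => l.modify (i + 1) (g i)) (a :: List.replicate (n + 1) a)
      = a :: ((List.range c).map (fun i => g i a) ++ (List.replicate (n - c) a ++ [a])) := by
  induction c with
  | zero =>
    simp only [List.range_zero, List.foldl_nil, List.map_nil, List.nil_append,
      Nat.sub_zero, List.replicate_succ']
  | succ c ih =>
    have hc' : c ≤ n := Nat.le_of_succ_le hc
    rw [List.range_succ, List.foldl_append, ih hc']
    have hlen : ((List.range c).map (fun i => g i a)).length = c := by simp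
    have hnc : n - c = (n - (c + 1)) + 1 := by omega
    rw [hnc, List.replicate_succ]
    simp only [List.foldl_cons, List.foldl_nil]
    rw [pv_modify_cons_succ]
    have h3 := pv_modify_append_right ((List.range c).map (fun i => g i a))
        (a :: (List.replicate (n - (c + 1)) a ++ [a])) 0 (g c)
    rw [hlen] at h3
    simp only [Nat.add_zero] at h3
    simp only [List.cons_append]
    rw [h3, pv_modify_zero_cons]
    simp

-- foldl respects pointwise-on-members equality of the step functions
theorem pv_foldl_congr {α β : Type} (L : List β) (f g : α → β → α) (a : α)
    (h : ∀ x b, b ∈ L → f x b = g x b) : L.foldl f a = L.foldl g a := by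
  induction L generalizing a with
  | nil => rfl
  | cons b t ih =>
    simp only [List.foldl_cons, h a b List.mem_cons_self]
    exact ih _ fun x c hc => h x c (List.mem_cons_of_mem _ hc)

-- mapping over range len with getD is mapping over the list
theorem pv_map_range_getD {α β : Type} (l : List α) (d : α) (G : α → β) :
    (List.range l.length).map (fun i => G (l.getD i d)) = l.map G := by
  induction l with
  | nil => simp
  | cons a t ih =>
    rw [List.length_cons, List.range_succ_eq_map]
    simp only [List.map_cons, List.map_map]
    refine congrArg₂ _ (by simp) ?_
    simpa using ih

-- reading the first c cells of r via getD is taking c cells, when c ≤ len r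
theorem pv_map_range_getD_take (r : List Int) (c : Nat) (h : c ≤ r.length) :
    (List.range c).map (fun j => r.getD j 0) = r.take c := by
  apply List.ext_getElem
  · simp [h]
  · intro i h1 h2
    have hi : i < c := by simpa using h1
    have hir : i < r.length := lt_of_lt_of_le hi h
    simp [List.getD, List.getElem?_eq_getElem hir]

theorem pad_matrix_eq (matrix : List (List Int)) (hne : matrix ≠ [])
    (hrows : ∀ row ∈ matrix, (matrix.headD []).length ≤ row.length) :
    pad_matrix matrix = pad_matrix_alt matrix := by
  obtain ⟨h0, t, rfl⟩ : ∃ h0 t, matrix = h0 :: t := by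
    cases matrix with
    | nil => exact absurd rfl hne
    | cons a t => exact ⟨a, t, rfl⟩
  set m := h0 :: t with hm
  have hcols : ((PySem.List.pyGet? m 0).getD []).length = h0.length := by
    simp [PySem.List.pyGet?, PySem.List.pyIdx?, hm]
  set cols := h0.length with hcolsdef
  set top := List.replicate (cols + 2) (1 : Int) with htop
  unfold pad_matrix pad_matrix_alt
  simp only [hcols]
  have hpad : (List.range (m.length + 2)).map (fun _ => List.replicate (cols + 2) (1 : Int))
      = top :: List.replicate (m.length + 1) top := by
    simp [← htop, List.replicate_succ]
  rw [hpad]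
  -- inner loops: rewrite each iteration's inner fold as a single modify
  have hinner : ∀ pm : List (List Int), ∀ i : Nat,
      (List.range cols).foldl (fun pm j =>
        pm.modify (i + 1) (fun row => row.set (j + 1) ((m.getD i []).getD j 0))) pm
      = pm.modify (i + 1) (fun x =>
          (List.range cols).foldl (fun x j => x.set (j + 1) ((m.getD i []).getD j 0)) x) := by
    intro pm i
    exact pv_foldl_modify_fixed (List.range cols) (i + 1)
      (fun j row => row.set (j + 1) ((m.getD i []).getD j 0)) pm
  have hbody : (List.range m.length).foldl (fun pm i =>
        (List.range cols).foldl (fun pm j =>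
          pm.modify (i + 1) (fun row => row.set (j + 1) ((m.getD i []).getD j 0))) pm)
        (top :: List.replicate (m.length + 1) top)
      = (List.range m.length).foldl (fun pm i =>
          pm.modify (i + 1) (fun x =>
            (List.range cols).foldl (fun x j => x.set (j + 1) ((m.getD i []).getD j 0)) x))
        (top :: List.replicate (m.length + 1) top) := by
    exact pv_foldl_congr (List.range m.length) _ _ _ (fun pm i _ => hinner pm i)
  rw [hbody]
  rw [pv_fold_frame (fun i x =>
      (List.range cols).foldl (fun x j => x.set (j + 1) ((m.getD i []).getD j 0)) x)
      top m.length m.length (le_refl _)]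
  -- each interior cell's inner fold on the border row gives the framed row
  have hrow : ∀ i, (List.range cols).foldl
        (fun x j => x.set (j + 1) ((m.getD i []).getD j 0)) top
      = 1 :: ((List.range cols).map (fun j => (m.getD i []).getD j 0) ++ [1]) := by
    intro i
    have : top = (1 : Int) :: List.replicate (cols + 1) 1 := by
      simp [htop, List.replicate_succ]
    rw [this]
    have := pv_fold_frame (fun j (_ : Int) => (m.getD i []).getD j 0) (1 : Int)
        cols cols (le_refl _)
    simp only [List.set_eq_modify] at *
    simpa using this
  have hmap : (List.range m.length).map (fun i =>
        (List.range cols).foldl (fun x j => x.set (j + 1) ((m.getD i []).getD j 0)) top)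
      = m.map (fun row => 1 :: (row.take cols ++ [1])) := by
    rw [show (fun i => (List.range cols).foldl
          (fun x j => x.set (j + 1) ((m.getD i []).getD j 0)) top)
        = (fun i => 1 :: ((List.range cols).map (fun j => (m.getD i []).getD j 0) ++ [1]))
        from funext hrow]
    have hG : ∀ i, (List.range cols).map (fun j => (m.getD i []).getD j 0)
        = (m.getD i []).take cols ∨ ¬ i < m.length := by
      intro i
      by_cases hi : i < m.length
      · left
        apply pv_map_range_getD_take
        have hmem : m.getD i [] ∈ m := by
          have : m.getD i [] = m[i] := by simp [List.getD, List.getElem?_eq_getElem hi]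
          rw [this]; exact List.getElem_mem hi
        have := hrows _ hmem
        simpa [hm, hcolsdef] using this
      · right; exact hi
    calc (List.range m.length).map (fun i =>
            1 :: ((List.range cols).map (fun j => (m.getD i []).getD j 0) ++ [1]))
        = (List.range m.length).map (fun i => 1 :: ((m.getD i []).take cols ++ [1])) := by
          apply List.map_congr_left
          intro i hi
          rcases hG i with h | h
          · rw [h]
          · exact absurd (List.mem_range.mp hi) h
      _ = m.map (fun row => 1 :: (row.take cols ++ [1])) := by
          exact pv_map_range_getD m [] (fun row => 1 :: (row.take cols ++ [1]))
  rw [hmap]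
  simp [hm]
  exact ⟨rfl, le_rfl, fun a _ => rfl, rfl⟩

-- ===== VERDICT (by name: the statement is the Claim_ definition above) =====
theorem pad_matrix_spec : Claim_equal_pad_matrix := by
  intro matrix _ hpre
  exact pad_matrix_eq matrix hpre.1 hpre.2
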